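-- pv_equiv track=rewrite | github.com/snd336/codility_python | lessons.py | when_list_full
-- ===== SOURCE A (Python) =====
-- def when_list_full(X, A):
--     river = list()
--     count = 0
--     for i in A:
--         if i not in river: # makes N**2
--             river.append(i)
--         if len(river) == X:
--             return count
--             break
--         count += 1
--
--     return -1
-- ===== SOURCE B (Python) =====
-- def when_list_full(X, A):
--     # Build a table of first-occurrence indices (value -> index), then pick the X-th.
--     first = {}
--     for i, v in enumerate(A):
--         if v not in first:
--             first[v] = i
--     order = list(first.values())
--     if 1 <= X <= len(order):
--         return order[X - 1]
--     return -1
-- ===== Notes on version B (the rewrite author's own statement) =====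
-- stated objective: faster
-- what changed: Replaces the scan with a linear membership test on a growing list and an early return by one dict pass recording first-occurrence indices, then a direct index into that table.
import Mathlib
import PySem

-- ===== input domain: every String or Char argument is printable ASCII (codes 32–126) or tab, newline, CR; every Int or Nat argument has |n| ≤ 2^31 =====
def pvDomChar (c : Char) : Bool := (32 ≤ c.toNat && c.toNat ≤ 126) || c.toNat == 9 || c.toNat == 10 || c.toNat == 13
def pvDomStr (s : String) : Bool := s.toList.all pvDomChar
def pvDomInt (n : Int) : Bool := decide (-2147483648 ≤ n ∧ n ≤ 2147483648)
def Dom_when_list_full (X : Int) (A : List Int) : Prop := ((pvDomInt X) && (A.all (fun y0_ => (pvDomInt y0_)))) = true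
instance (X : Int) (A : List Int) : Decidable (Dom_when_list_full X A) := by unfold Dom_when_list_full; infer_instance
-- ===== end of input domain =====

-- B replaces A's per-element linear membership scan over a growing list (with early return)
-- by one dict pass recording first-occurrence indices, then a direct index into that table (faster).


-- ===== PORT A =====
-- literal port of A's loop: river list, membership append, early return when len(river) == X
def when_list_full_go (X : Int) : List Int → List Int → Int → Int
  | [], _, _ => -1
  | i :: rest, river, count =>
    let river' := if i ∈ river then river else river ++ [i]
    if (river'.length : Int) = X then count
    else when_list_full_go X rest river' (count + 1)

def when_list_full (X : Int) (A : List Int) : Int := when_list_full_go X A [] 0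

-- ===== PORT B =====
def when_list_full_alt (X : Int) (A : List Int) : Int :=
  let first := (PySem.List.enumerate A).foldl
    (fun (d : PySem.Dict Int Int) p => if d.contains p.2 then d else d.insert p.2 p.1)
    PySem.Dict.empty
  let order := first.values
  if 1 ≤ X ∧ X ≤ (order.length : Int) then (PySem.List.pyGet? order (X - 1)).getD (-1)
  else -1

-- ===== PRECONDITION & SPEC =====
def Spec_when_list_full (X : Int) (A : List Int) (out : Int) : Prop := out = when_list_full_alt X A
instance (X : Int) (A : List Int) (out : Int) : Decidable (Spec_when_list_full X A out) := by unfold Spec_when_list_full; infer_instance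

-- ===== CLAIM (what is proved, stated in full; the proofs are below) =====
def Claim_equal_when_list_full : Prop := ∀ (X : Int) (A : List Int), Dom_when_list_full X A → Spec_when_list_full X A (when_list_full X A)

-- ===== LEMMAS AND PROOFS =====

-- indices of first occurrences of the values of the list, given already-seen values and start index
def pvFirsts : List Int → Int → List Int → List Int
  | [], _, _ => []
  | v :: rest, i, seen =>
    if v ∈ seen then pvFirsts rest (i + 1) seen
    else i :: pvFirsts rest (i + 1) (seen ++ [v])

-- A's loop returns the (X - |river|)-th entry of pvFirsts, or -1
theorem pvA_go (X : Int) (rest : List Int) : ∀ (river : List Int) (count : Int),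
    (X ≤ 0 ∨ (river.length : Int) < X) →
    when_list_full_go X rest river count =
      (if 1 ≤ X - river.length ∧ X - (river.length : Int) ≤ (pvFirsts rest count river).length
       then (pvFirsts rest count river).getD (X - river.length - 1).toNat (-1) else -1) := by
  induction rest with
  | nil =>
    intro river count _
    simp only [when_list_full_go, pvFirsts, List.length_nil]
    split
    · omega
    · rfl
  | cons v rest ih =>
    intro river count h
    simp only [when_list_full_go, pvFirsts]
    by_cases hmem : v ∈ river
    · have hne : ¬ ((river.length : Int) = X) := by
        have : river ≠ [] := by intro e; simp [e] at hmem
        have : 0 < river.length := List.length_pos_iff.mpr this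
        omega
      simp only [hmem, if_true, if_neg hne]
      exact ih river (count + 1) h
    · simp only [hmem, if_false, List.length_append, List.length_cons, List.length_nil]
      by_cases hX : ((river.length + 1 : Nat) : Int) = X
      · simp only [hX, if_true]
        have hx1 : X - (river.length : Int) = 1 := by push_cast at hX ⊢; omega
        rw [if_pos]
        · rw [show (X - (river.length : Int) - 1).toNat = 0 from by omega]
          rfl
        · constructor
          · omega
          · push_cast; omega
      · rw [if_neg (by push_cast at hX ⊢; omega)]
        have h' : X ≤ 0 ∨ ((river ++ [v]).length : Int) < X := by
          simp only [List.length_append, List.length_cons, List.length_nil]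
          push_cast at hX ⊢; omega
        rw [ih (river ++ [v]) (count + 1) h']
        simp only [List.length_append, List.length_cons, List.length_nil]
        by_cases hc : 1 ≤ X - ((river.length : Int) + 1) ∧
            X - ((river.length : Int) + 1) ≤ ((pvFirsts rest (count + 1) (river ++ [v])).length : Int)
        · rw [if_pos (by push_cast at hc ⊢; omega), if_pos (by push_cast at hc ⊢; omega)]
          have : (X - (river.length : Int) - 1).toNat = (X - ((river.length : Int) + 1) - 1).toNat + 1 := by
            omega
          rw [this]
          simp [List.getD]
        · rw [if_neg (by push_cast at hc ⊢; omega), if_neg (by push_cast at hc ⊢; omega)]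

-- B's dict loop: values of the dict = already-collected values ++ pvFirsts over the rest
theorem pvB_fold (rest : List Int) : ∀ (s : Int) (d : PySem.Dict Int Int),
    ((PySem.List.enumerate rest s).foldl
      (fun (d : PySem.Dict Int Int) p => if d.contains p.2 then d else d.insert p.2 p.1) d).values
      = d.values ++ pvFirsts rest s d.keys := by
  induction rest with
  | nil => intro s d; simp [PySem.List.enumerate_nil, pvFirsts]
  | cons v rest ih =>
    intro s d
    rw [PySem.List.enumerate_cons]
    simp only [List.foldl_cons, pvFirsts]
    by_cases hmem : v ∈ d.keys
    · have hc : d.contains v = true := (PySem.Dict.contains_iff_mem_keys d v).mpr hmem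
      simp only [hc, if_true, hmem]
      exact ih (s + 1) d
    · have hc : d.contains v = false := by
        by_contra h
        exact hmem ((PySem.Dict.contains_iff_mem_keys d v).mp (by simpa using h))
      simp only [hc, Bool.false_eq_true, if_false, hmem]
      rw [ih (s + 1) (d.insert v s)]
      rw [PySem.Dict.keys_insert_of_not_contains d s hc]
      have hv : (d.insert v s).values = d.values ++ [s] := by
        simp only [PySem.Dict.values, PySem.Dict.items_insert_of_not_contains d s hc,
          List.map_append, List.map_cons, List.map_nil]
      rw [hv, List.append_assoc]
      rfl

-- ===== VERDICT (by name: the statement is the Claim_ definition above) =====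
theorem when_list_full_spec : Claim_equal_when_list_full := by
  intro X A _
  unfold Spec_when_list_full when_list_full when_list_full_alt
  dsimp only
  rw [pvA_go X A [] 0 (by simp only [List.length_nil, Nat.cast_zero]; omega)]
  rw [pvB_fold A 0 PySem.Dict.empty]
  simp only [PySem.Dict.values, PySem.Dict.keys, PySem.Dict.empty, List.map_nil,
    List.nil_append, List.length_nil, Nat.cast_zero, sub_zero]
  by_cases hc : 1 ≤ X ∧ X ≤ ((pvFirsts A 0 []).length : Int)
  · rw [if_pos hc, if_pos hc]
    rw [show X - 1 = (((X - 1).toNat : Nat) : Int) from by omega]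
    simp [PySem.List.pyGet?_natCast, List.getD_eq_getElem?_getD]
  · rw [if_neg hc, if_neg hc]
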